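-- pv_equiv track=rewrite | github.com/raul76/descodificacion | init.py | vandermonde
-- ===== SOURCE A (Python) =====
-- def vandermonde(lista):
--   """
--       Resuelve un determinante de Vandermonde.
--   """
--   if len(lista) == 1:
--     return 1
--   siguiente = lista.copy()
--   ultimo = siguiente.pop()
--   resultado = 1
--   for valor in siguiente:
--     resultado *= (ultimo - valor)
--   return resultado * vandermonde(siguiente)
-- ===== SOURCE B (Python) =====
-- def vandermonde(lista):
--   """
--       Resuelve un determinante de Vandermonde.
--   """
--   result = 1
--   seen = []
--   for x in lista:
--     for y in seen:
--       result *= (x - y)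
--     seen.append(x)
--   return result
-- ===== Notes on version B (the rewrite author's own statement) =====
-- stated objective: simpler
-- what changed: Replaces the right-peeling recursion (copy + pop + recurse) with a single forward pass that multiplies each new element's differences against the prefix seen so far.
import Mathlib
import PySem

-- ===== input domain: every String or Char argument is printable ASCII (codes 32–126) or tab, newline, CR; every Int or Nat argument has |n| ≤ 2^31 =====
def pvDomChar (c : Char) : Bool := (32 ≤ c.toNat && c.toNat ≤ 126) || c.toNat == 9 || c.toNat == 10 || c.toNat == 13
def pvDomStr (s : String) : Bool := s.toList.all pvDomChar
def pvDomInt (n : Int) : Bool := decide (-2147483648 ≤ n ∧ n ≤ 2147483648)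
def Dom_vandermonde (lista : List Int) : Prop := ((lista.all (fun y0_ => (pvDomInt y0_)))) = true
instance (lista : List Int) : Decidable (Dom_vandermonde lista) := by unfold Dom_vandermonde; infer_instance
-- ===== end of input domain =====

-- B replaces A's copy/pop/recurse right-peeling with a single forward pass over the list
-- (accumulating the prefix seen so far): same O(n^2) product, simpler iterative decomposition.


-- ===== PORT A =====
-- A: if len == 1 return 1; else copy, pop the last element, multiply (ultimo - valor)
-- over the remaining prefix, recurse on the prefix.  On [] Python's pop raises
-- IndexError (excluded by Pre_; the port returns 0 there, a value the claim never reaches).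
def vandermonde (lista : List Int) : Int :=
  match lista with
  | [] => 0
  | [_] => 1
  | x :: y :: rest =>
    let siguiente := (x :: y :: rest).dropLast
    let ultimo := (x :: y :: rest).getLast!
    (siguiente.foldl (fun r v => r * (ultimo - v)) 1) * vandermonde siguiente
termination_by lista.length
decreasing_by simp

-- ===== PORT B =====
-- B: one forward pass; state = (result, seen); for each x multiply (x - y) over seen, append x.
def vandermonde_alt (lista : List Int) : Int :=
  (lista.foldl
    (fun (p : Int × List Int) x =>
      (p.2.foldl (fun r y => r * (x - y)) p.1, p.2 ++ [x]))
    (1, [])).1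

-- ===== PRECONDITION & SPEC =====
-- Pre_ excludes only the empty list, on which A raises IndexError (pop from empty list).
def Pre_vandermonde (lista : List Int) : Prop := lista ≠ []
instance (lista : List Int) : Decidable (Pre_vandermonde lista) := by unfold Pre_vandermonde; infer_instance
def pvWitness_vandermonde : List Int := [1, 2, 3]

def Spec_vandermonde (lista : List Int) (out : Int) : Prop := out = vandermonde_alt lista
instance (lista : List Int) (out : Int) : Decidable (Spec_vandermonde lista out) := by unfold Spec_vandermonde; infer_instance

-- ===== CLAIM (what is proved, stated in full; the proofs are below) =====
def Claim_equal_vandermonde : Prop := ∀ (lista : List Int), Dom_vandermonde lista → Pre_vandermonde lista → Spec_vandermonde lista (vandermonde lista)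
-- ===== LEMMAS AND PROOFS =====

-- B's loop body, named for the lemmas.
def vStep (p : Int × List Int) (x : Int) : Int × List Int :=
  (p.2.foldl (fun r y => r * (x - y)) p.1, p.2 ++ [x])

theorem vandermonde_alt_eq_vStep (lista : List Int) :
    vandermonde_alt lista = (lista.foldl vStep (1, [])).1 := rfl

-- The seen-component of B's state is the processed prefix.
theorem vStep_snd (l : List Int) (r : Int) (s : List Int) :
    (l.foldl vStep (r, s)).2 = s ++ l := by
  induction l generalizing r s with
  | nil => simp
  | cons x t ih => simp [vStep, ih]

-- The result-component factors through the initial accumulator.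
theorem foldl_mul_factor (l : List Int) (x a : Int) :
    l.foldl (fun r y => r * (x - y)) a = a * l.foldl (fun r y => r * (x - y)) 1 := by
  induction l generalizing a with
  | nil => simp
  | cons z t ih =>
    simp only [List.foldl_cons]
    rw [ih (a * (x - z)), ih (1 * (x - z))]
    ring

-- B on a snoc: multiply the final element's differences against the whole prefix.
theorem alt_concat (l : List Int) (x : Int) :
    vandermonde_alt (l ++ [x]) =
      vandermonde_alt l * l.foldl (fun r y => r * (x - y)) 1 := by
  simp only [vandermonde_alt_eq_vStep, List.foldl_append]
  show (vStep (l.foldl vStep (1, [])) x).1 = _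
  simp only [vStep, vStep_snd, List.nil_append]
  rw [foldl_mul_factor]

-- A on a snoc with a nonempty prefix: unfolds the recursive case.
theorem vandermonde_concat (l : List Int) (x : Int) (h : l ≠ []) :
    vandermonde (l ++ [x]) =
      (l.foldl (fun r v => r * (x - v)) 1) * vandermonde l := by
  obtain ⟨a, t, rfl⟩ := List.exists_cons_of_ne_nil h
  cases t with
  | nil => simp [vandermonde]
  | cons b u =>
    have hd : (a :: b :: (u ++ [x])).dropLast = a :: b :: u := by
      show ((a :: b :: u) ++ [x]).dropLast = a :: b :: u
      exact List.dropLast_concat ..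
    have hl : (a :: b :: (u ++ [x])).getLast! = x := by
      show ((a :: b :: u) ++ [x]).getLast! = x
      simp [List.getLast!]
    show vandermonde (a :: b :: (u ++ [x])) = _
    rw [vandermonde, hd, hl]

theorem vandermonde_eq_alt (l : List Int) (h : l ≠ []) :
    vandermonde l = vandermonde_alt l := by
  induction l using List.reverseRecOn with
  | nil => exact absurd rfl h
  | append_singleton t x ih =>
    cases ht : t with
    | nil => subst ht; simp [vandermonde, vandermonde_alt]
    | cons a u =>
      rw [← ht]
      have htne : t ≠ [] := by simp [ht]
      rw [vandermonde_concat t x htne, alt_concat t x, ih htne, mul_comm]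

-- ===== VERDICT (by name: the statement is the Claim_ definition above) =====
theorem vandermonde_spec : Claim_equal_vandermonde := by
  intro lista _ hpre
  exact vandermonde_eq_alt lista hpre
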